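-- pv_equiv track=rewrite | github.com/ApplesHUFS/Project-LOPE | LopeScript/DataProc/preprocessing.py | collapse_silences
-- ===== SOURCE A (Python) =====
-- from typing import Dict, List, Optional
--
-- def is_silence(phoneme: str) -> bool:
--     return phoneme.lower() in {"sil", "sp", "spn", "pau", ""}
--
-- def collapse_silences(seq: List[str]) -> List[str]:
--     """앞뒤 sil 제거 + 내부 연속 sil은 하나로 압축."""
--     if not seq:
--         return seq
--     # trim ends
--     i, j = 0, len(seq) - 1
--     while i <= j and is_silence(seq[i]): i += 1
--     while j >= i and is_silence(seq[j]): j -= 1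
--     if i > j:
--         return []
--     core = seq[i:j+1]
--     out, prev_sil = [], False
--     for p in core:
--         s = is_silence(p)
--         if s:
--             if not prev_sil:
--                 out.append("sil")
--             prev_sil = True
--         else:
--             out.append(p)
--             prev_sil = False
--     return out
-- ===== SOURCE B (Python) =====
-- from itertools import groupby
--
--
-- def is_silence(phoneme: str) -> bool:
--     return phoneme.lower() in {"sil", "sp", "spn", "pau", ""}
--
--
-- def collapse_silences(seq):
--     # collapse first: one "sil" per run of silences, other tokens unchanged
--     out = []
--     for k, g in groupby(seq, key=is_silence):
--         if k:
--             out.append("sil")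
--         else:
--             out.extend(g)
--     # then trim: collapse guarantees at most one "sil" at each end
--     if out and out[0] == "sil":
--         out = out[1:]
--     if out and out[-1] == "sil":
--         out = out[:-1]
--     return out
-- ===== Notes on version B (the rewrite author's own statement) =====
-- stated objective: idiomatic
-- what changed: Replaces A's index-pointer trimming loops plus prev_sil state-machine fold with itertools.groupby run-grouping (collapse whole sequence first, then strip the single possible leading/trailing 'sil').
import Mathlib
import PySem

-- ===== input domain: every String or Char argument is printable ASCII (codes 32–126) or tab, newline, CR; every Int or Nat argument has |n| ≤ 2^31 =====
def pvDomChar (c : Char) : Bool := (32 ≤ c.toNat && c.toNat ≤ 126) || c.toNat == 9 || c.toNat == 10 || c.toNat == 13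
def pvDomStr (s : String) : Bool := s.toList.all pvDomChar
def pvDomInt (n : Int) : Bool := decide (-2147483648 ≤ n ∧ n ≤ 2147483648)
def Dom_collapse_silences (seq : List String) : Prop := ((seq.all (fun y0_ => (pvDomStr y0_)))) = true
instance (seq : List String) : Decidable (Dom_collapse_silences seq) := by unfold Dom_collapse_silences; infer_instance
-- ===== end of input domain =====

-- B replaces A's index-pointer trimming loops + prev_sil state-machine fold by run grouping
-- (groupby-style collapse first, then strip the single possible leading/trailing "sil"); alternative decomposition, same cost.

-- ===== PORT A =====
def is_silence (phoneme : String) : Bool :=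
  let l := PySem.Str.lower phoneme
  l == "sil" || l == "sp" || l == "spn" || l == "pau" || l == ""

-- while i <= j and is_silence(seq[i]): i += 1   (the guard keeps i in range, so pyGetD's default is never read)
def aTrimI (seq : List String) (i j : Int) : Int :=
  if h : i ≤ j ∧ is_silence (PySem.List.pyGetD seq i "") then aTrimI seq (i + 1) j else i
termination_by (j + 1 - i).toNat
decreasing_by obtain ⟨h1, -⟩ := h; omega

-- while j >= i and is_silence(seq[j]): j -= 1
def aTrimJ (seq : List String) (i j : Int) : Int :=
  if h : j ≥ i ∧ is_silence (PySem.List.pyGetD seq j "") then aTrimJ seq i (j - 1) else j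
termination_by (j + 1 - i).toNat
decreasing_by obtain ⟨h1, -⟩ := h; omega

-- the body of A's `for p in core` loop, state (out, prev_sil)
def aStep (acc : List String × Bool) (p : String) : List String × Bool :=
  let s := is_silence p
  if s then ((if !acc.2 then acc.1 ++ ["sil"] else acc.1), true)
  else (acc.1 ++ [p], false)

def collapse_silences (seq : List String) : List String :=
  if seq = [] then seq
  else
    let i := aTrimI seq 0 ((seq.length : Int) - 1)
    let j := aTrimJ seq i ((seq.length : Int) - 1)
    if i > j then []
    else
      let core := PySem.List.slice seq (some i) (some (j + 1))
      (core.foldl aStep ([], false)).1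

-- ===== PORT B =====
-- for k, g in groupby(seq, key=is_silence): one "sil" per silence-keyed group, all tokens otherwise
def bGroups : List String → List String
  | [] => []
  | p :: rest =>
    let k := is_silence p
    let run := rest.takeWhile (fun q => is_silence q == k)
    let rest' := rest.dropWhile (fun q => is_silence q == k)
    (if k then ["sil"] else p :: run) ++ bGroups rest'
termination_by xs => xs.length
decreasing_by
  have := List.length_dropWhile_le (fun q => is_silence q == is_silence p) rest
  simp only [List.length_cons]; omega

def collapse_silences_alt (seq : List String) : List String :=
  let out := bGroups seq
  let out1 := if out.head? == some "sil" then PySem.List.slice out (some 1) none else out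
  if out1.getLast? == some "sil" then PySem.List.slice out1 none (some (-1)) else out1

-- ===== PRECONDITION & SPEC =====
def Spec_collapse_silences (seq : List String) (out : List String) : Prop := out = collapse_silences_alt seq
instance (seq : List String) (out : List String) : Decidable (Spec_collapse_silences seq out) := by unfold Spec_collapse_silences; infer_instance

-- ===== CLAIM (what is proved, stated in full; the proofs are below) =====
def Claim_equal_collapse_silences : Prop := ∀ (seq : List String), Dom_collapse_silences seq → Spec_collapse_silences seq (collapse_silences seq)

-- ===== LEMMAS AND PROOFS =====

lemma nonsil_ne_sil {x : String} (h : is_silence x = false) : x ≠ "sil" := by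
  intro he; subst he
  have : is_silence "sil" = true := by decide
  rw [this] at h; exact Bool.noConfusion h

-- B's groupby loop, one element at a time
lemma bG_nil : bGroups [] = [] := by rw [bGroups]

lemma bG_run (xs : List String) :
    xs.takeWhile (fun q => !is_silence q) ++ bGroups (xs.dropWhile (fun q => !is_silence q)) = bGroups xs := by
  cases xs with
  | nil => rfl
  | cons y ys =>
    by_cases hy : is_silence y = true
    · simp [List.dropWhile_cons, hy]
    · rw [Bool.not_eq_true] at hy
      rw [bGroups]
      simp [hy, beq_false]

lemma bG_cons_sil {x : String} (xs : List String) (hx : is_silence x = true) :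
    bGroups (x :: xs) = "sil" :: bGroups (xs.dropWhile is_silence) := by
  rw [bGroups]
  simp [hx, beq_true]

lemma bG_cons_nonsil {x : String} (xs : List String) (hx : is_silence x = false) :
    bGroups (x :: xs) = x :: bGroups xs := by
  rw [bGroups]
  simp only [hx, beq_false, Bool.false_eq_true, if_false, List.cons_append, List.cons.injEq, true_and]
  exact bG_run xs

lemma bG_all_sil {s : List String} (h : ∀ x ∈ s, is_silence x = true) (hne : s ≠ []) :
    bGroups s = ["sil"] := by
  cases s with
  | nil => exact absurd rfl hne
  | cons y ys =>
    rw [bG_cons_sil ys (h y (List.mem_cons_self))]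
    rw [List.dropWhile_eq_nil_iff.mpr (fun x hx => h x (List.mem_cons_of_mem _ hx)), bG_nil]

lemma getLast_dropWhile {p : String → Bool} {l : List String} (h : l.dropWhile p ≠ []) (hl : l ≠ []) :
    (l.dropWhile p).getLast h = l.getLast hl := by
  have h1 : (l.dropWhile p).getLast? = l.getLast? := by
    conv_rhs => rw [← List.takeWhile_append_dropWhile (p := p) (l := l)]
    exact (List.getLast?_append_of_ne_nil _ h).symm
  rw [List.getLast?_eq_some_getLast h, List.getLast?_eq_some_getLast hl] at h1
  exact Option.some.inj h1

lemma bG_append_aux (k : Nat) : ∀ (c zs : List String), c.length ≤ k → ∀ (hc : c ≠ []),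
    is_silence (c.getLast hc) = false → bGroups (c ++ zs) = bGroups c ++ bGroups zs := by
  induction k with
  | zero =>
    intro c zs hlen hc _
    cases c with
    | nil => exact absurd rfl hc
    | cons x c' => simp at hlen
  | succ k ih =>
    intro c zs hlen hc hlast
    cases c with
    | nil => exact absurd rfl hc
    | cons x c' =>
      by_cases hc' : c' = []
      · subst hc'
        rw [List.getLast_singleton] at hlast
        simp only [List.cons_append, List.nil_append]
        rw [bG_cons_nonsil zs hlast, bG_cons_nonsil [] hlast, bG_nil]
        simp
      · have hlast' : is_silence (c'.getLast hc') = false := by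
          rwa [List.getLast_cons hc'] at hlast
        have hdwne : c'.dropWhile is_silence ≠ [] := by
          intro he
          have hall := List.dropWhile_eq_nil_iff.mp he
          rw [hall (c'.getLast hc') (List.getLast_mem hc')] at hlast'
          exact Bool.noConfusion hlast'
        by_cases hx : is_silence x = true
        · rw [List.cons_append, bG_cons_sil _ hx, bG_cons_sil _ hx]
          rw [List.dropWhile_append]
          simp only [List.isEmpty_iff, hdwne, if_false]
          have hgl : is_silence ((c'.dropWhile is_silence).getLast hdwne) = false := by
            rw [getLast_dropWhile hdwne hc']; exact hlast'
          rw [ih (c'.dropWhile is_silence) zs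
              (by have := List.length_dropWhile_le is_silence c'; simp at hlen; omega) hdwne hgl]
          simp
        · rw [Bool.not_eq_true] at hx
          rw [List.cons_append, bG_cons_nonsil _ hx, bG_cons_nonsil _ hx]
          rw [ih c' zs (by simp at hlen; omega) hc' hlast']
          simp
lemma bG_append {c : List String} (zs : List String) (hc : c ≠ [])
    (hlast : is_silence (c.getLast hc) = false) : bGroups (c ++ zs) = bGroups c ++ bGroups zs :=
  bG_append_aux c.length c zs le_rfl hc hlast

lemma bG_snoc_aux {x : String} (hx : is_silence x = false) (k : Nat) :
    ∀ (c : List String), c.length ≤ k → bGroups (c ++ [x]) = bGroups c ++ [x] := by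
  induction k with
  | zero =>
    intro c hlen
    have : c = [] := by cases c with | nil => rfl | cons y c' => simp at hlen
    subst this
    simp [bG_cons_nonsil [] hx, bG_nil]
  | succ k ih =>
    intro c hlen
    cases c with
    | nil => simp [bG_cons_nonsil [] hx, bG_nil]
    | cons y c' =>
      by_cases hy : is_silence y = true
      · rw [List.cons_append, bG_cons_sil _ hy, bG_cons_sil _ hy]
        rw [List.dropWhile_append]
        by_cases hdw : c'.dropWhile is_silence = []
        · simp only [List.isEmpty_iff, hdw, if_true]
          rw [List.dropWhile_cons]
          simp [hx, bG_cons_nonsil [] hx, bG_nil]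
        · simp only [List.isEmpty_iff, hdw, if_false]
          rw [ih (c'.dropWhile is_silence)
              (by have := List.length_dropWhile_le is_silence c'; simp at hlen; omega)]
          simp
      · rw [Bool.not_eq_true] at hy
        rw [List.cons_append, bG_cons_nonsil _ hy, bG_cons_nonsil _ hy]
        rw [ih c' (by simp at hlen; omega)]
        simp
lemma bG_snoc {x : String} (c : List String) (hx : is_silence x = false) :
    bGroups (c ++ [x]) = bGroups c ++ [x] :=
  bG_snoc_aux hx c.length c le_rfl

-- A's fold over core computes exactly B's collapsed groups
lemma fold_eq_bGroups (xs : List String) : ∀ (out : List String) (b : Bool),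
    (xs.foldl aStep (out, b)).1 =
      out ++ (if b then bGroups (xs.dropWhile is_silence) else bGroups xs) := by
  induction xs with
  | nil => intro out b; cases b <;> simp [bG_nil]
  | cons x xs ih =>
    intro out b
    by_cases hx : is_silence x = true
    · cases b
      · have : aStep (out, false) x = (out ++ ["sil"], true) := by simp [aStep, hx]
        rw [List.foldl_cons, this, ih]
        rw [bG_cons_sil xs hx]
        simp
      · have : aStep (out, true) x = (out, true) := by simp [aStep, hx]
        rw [List.foldl_cons, this, ih]
        rw [List.dropWhile_cons_of_pos (by simpa using hx)]
        simp
    · rw [Bool.not_eq_true] at hx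
      have : ∀ b, aStep (out, b) x = (out ++ [x], false) := by intro b; simp [aStep, hx]
      cases b
      · rw [List.foldl_cons, this false, ih, bG_cons_nonsil xs hx]
        simp
      · rw [List.foldl_cons, this true, ih]
        rw [List.dropWhile_cons_of_neg (by simp [hx]), bG_cons_nonsil xs hx]
        simp

-- A's first while loop: i ends at the length of the silent prefix
lemma aTrimI_eq_aux (seq : List String) (k : Nat) : ∀ (i : Nat), seq.length - i ≤ k → i ≤ seq.length →
    aTrimI seq (i : Int) ((seq.length : Int) - 1)
      = (i : Int) + (((seq.drop i).takeWhile is_silence).length : Int) := by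
  induction k with
  | zero =>
    intro i hk hi
    have hlen : i = seq.length := by omega
    subst hlen
    rw [aTrimI, dif_neg (by rintro ⟨h1, -⟩; omega)]
    simp [List.drop_length]
  | succ k ih =>
    intro i hk hi
    by_cases hil : i < seq.length
    · have hget : PySem.List.pyGetD seq (i : Int) "" = seq[i]'hil := by
        simp [PySem.List.pyGetD_natCast, List.getD_eq_getElem?_getD, List.getElem?_eq_getElem hil]
      have hdrop : seq.drop i = seq[i]'hil :: seq.drop (i + 1) := List.drop_eq_getElem_cons hil
      by_cases hsil : is_silence (seq[i]'hil) = true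
      · rw [aTrimI, dif_pos ⟨by omega, by rw [hget]; exact hsil⟩]
        have hcast : ((i : Int) + 1) = ((i + 1 : Nat) : Int) := by push_cast; ring
        rw [hcast, ih (i + 1) (by omega) (by omega)]
        rw [hdrop, List.takeWhile_cons_of_pos hsil]
        simp only [List.length_cons]
        push_cast; ring
      · rw [aTrimI, dif_neg (by rw [hget]; rintro ⟨-, h2⟩; exact hsil h2)]
        rw [hdrop, List.takeWhile_cons_of_neg (by simpa using hsil)]
        simp
    · have hlen : i = seq.length := by omega
      subst hlen
      rw [aTrimI, dif_neg (by rintro ⟨h1, -⟩; omega)]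
      simp [List.drop_length]

-- A's second while loop: j ends just left of the silent suffix of seq[i:j+1]
lemma aTrimJ_eq_aux (seq : List String) (i : Nat) (hilen : i < seq.length)
    (hns : is_silence (seq[i]'hilen) = false) (k : Nat) : ∀ (j : Nat), j - i ≤ k → i ≤ j → j < seq.length →
    aTrimJ seq (i : Int) (j : Int)
      = (j : Int) - (((((seq.take (j + 1)).drop i).reverse.takeWhile is_silence).length : Nat) : Int) := by
  have hstep : ∀ (j : Nat), i ≤ j → (hjl : j < seq.length) →
      (seq.take (j + 1)).drop i = (seq.take j).drop i ++ [seq[j]'hjl] := by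
    intro j hij hjl
    rw [List.take_succ_eq_append_getElem hjl, List.drop_append]
    have h0 : i - (seq.take j).length = 0 := by
      simp [List.length_take]; omega
    rw [h0]
    simp
  have hgetj : ∀ (j : Nat), (hjl : j < seq.length) →
      PySem.List.pyGetD seq (j : Int) "" = seq[j]'hjl := by
    intro j hjl
    simp [PySem.List.pyGetD_natCast, List.getD_eq_getElem?_getD, List.getElem?_eq_getElem hjl]
  induction k with
  | zero =>
    intro j hk hij hjl
    have hie : i = j := by omega
    subst hie
    rw [aTrimJ, dif_neg (by rw [hgetj i hjl]; rintro ⟨-, h2⟩; rw [hns] at h2; exact Bool.noConfusion h2)]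
    rw [hstep i le_rfl hjl, List.reverse_concat,
        List.takeWhile_cons_of_neg (by simp [hns])]
    simp
  | succ k ih =>
    intro j hk hij hjl
    by_cases hsil : is_silence (seq[j]'hjl) = true
    · have hij' : i ≠ j := by
        intro he; subst he; rw [hns] at hsil; exact Bool.noConfusion hsil
      rw [aTrimJ, dif_pos ⟨by omega, by rw [hgetj j hjl]; exact hsil⟩]
      have hcast : (j : Int) - 1 = ((j - 1 : Nat) : Int) := by omega
      rw [hcast, ih (j - 1) (by omega) (by omega) (by omega)]
      have hj1 : (j - 1) + 1 = j := by omega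
      rw [hj1, hstep j hij hjl, List.reverse_concat, List.takeWhile_cons_of_pos hsil]
      simp only [List.length_cons]
      push_cast
      omega
    · rw [aTrimJ, dif_neg (by rw [hgetj j hjl]; rintro ⟨-, h2⟩; exact hsil h2)]
      rw [hstep j hij hjl, List.reverse_concat,
          List.takeWhile_cons_of_neg (by simpa using hsil)]
      simp

-- ===== VERDICT (by name: the statement is the Claim_ definition above) =====
theorem collapse_silences_spec : Claim_equal_collapse_silences := by
  intro seq _
  unfold Spec_collapse_silences
  by_cases hne : seq = []
  · subst hne
    simp [collapse_silences, collapse_silences_alt, bG_nil]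
  · have hn : 0 < seq.length := List.length_pos_iff.mpr hne
    have hI : aTrimI seq 0 ((seq.length : Int) - 1) = ((seq.takeWhile is_silence).length : Int) := by
      simpa using aTrimI_eq_aux seq seq.length 0 (by omega) (by omega)
    set L : Nat := (seq.takeWhile is_silence).length with hLdef
    set d : List String := seq.dropWhile is_silence with hddef
    have hLd : L + d.length = seq.length := by
      rw [hLdef, hddef, ← List.length_append, List.takeWhile_append_dropWhile]
    have hdropL : seq.drop L = d := by
      conv_lhs => rw [← List.takeWhile_append_dropWhile (p := is_silence) (l := seq)]
      exact List.drop_left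
    by_cases hd : d = []
    · -- seq is entirely silent: A trims everything, B collapses to ["sil"] and strips it
      have hLn : L = seq.length := by rw [hd] at hLd; simpa using hLd
      have hJ : aTrimJ seq ((L : Nat) : Int) ((seq.length : Int) - 1) = (seq.length : Int) - 1 := by
        rw [aTrimJ, dif_neg]; rintro ⟨h1, -⟩; rw [hLn] at h1; omega
      have hall : ∀ x ∈ seq, is_silence x = true := by
        rw [hddef] at hd; exact List.dropWhile_eq_nil_iff.mp hd
      have hB : bGroups seq = ["sil"] := bG_all_sil hall hne
      simp only [collapse_silences, collapse_silences_alt, if_neg hne, hI, hJ, hB]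
      rw [if_pos (by omega)]
      simp [PySem.List.slice_from_one]
    · -- there is a non-silent token
      have hdlpos : 0 < d.length := List.length_pos_iff.mpr hd
      have hLlt : L < seq.length := by omega
      have hdh : is_silence (d.head hd) = false := List.head_dropWhile_not is_silence hd
      have hLelem : seq[L]'hLlt = d.head hd := by
        have h1 : seq[L]'hLlt = (seq.drop L)[0]'(by rw [hdropL]; exact hdlpos) := by
          simp [List.getElem_drop]
        rw [h1]
        simp only [hdropL]
        exact List.getElem_zero _
      have hns : is_silence (seq[L]'hLlt) = false := by rw [hLelem]; exact hdh
      set s : List String := d.rtakeWhile is_silence with hsdef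
      set c : List String := d.rdropWhile is_silence with hcdef
      have hcs : c ++ s = d := List.rdropWhile_append_rtakeWhile
      have hclen : c.length + s.length = d.length := by rw [← List.length_append, hcs]
      have hcne : c ≠ [] := by
        rw [hcdef]
        intro hnil
        have hall2 := List.rdropWhile_eq_nil_iff.mp hnil
        rw [hall2 (d.head hd) (List.head_mem hd)] at hdh
        exact Bool.noConfusion hdh
      have hcpos : 0 < c.length := List.length_pos_iff.mpr hcne
      have hlastc : is_silence (c.getLast hcne) = false := by
        have := List.rdropWhile_last_not (p := is_silence) (l := d) hcne
        simpa using this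
      have hTs : (((seq.take ((seq.length - 1) + 1)).drop L).reverse.takeWhile is_silence).length
          = s.length := by
        have h1 : (seq.length - 1) + 1 = seq.length := by omega
        rw [h1, List.take_length, hdropL, hsdef, List.rtakeWhile, List.length_reverse]
      have hJ : aTrimJ seq ((L : Nat) : Int) ((seq.length : Int) - 1)
          = ((seq.length : Int) - 1) - (s.length : Int) := by
        have hcast : ((seq.length : Int) - 1) = ((seq.length - 1 : Nat) : Int) := by omega
        rw [hcast, aTrimJ_eq_aux seq L hLlt hns seq.length (seq.length - 1) (by omega) (by omega)
            (by omega), hTs]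
      have hcore : PySem.List.slice seq (some ((L : Nat) : Int))
          (some ((((seq.length : Int) - 1) - (s.length : Int)) + 1)) = c := by
        have hb : (((seq.length : Int) - 1) - (s.length : Int)) + 1
            = ((seq.length - s.length : Nat) : Int) := by omega
        rw [hb, PySem.List.slice_natCast, hdropL]
        have h2 : seq.length - s.length - L = c.length := by omega
        rw [h2, ← hcs, List.take_left]
      have hA : collapse_silences seq = bGroups c := by
        simp only [collapse_silences, if_neg hne, hI, hJ]
        rw [if_neg (by omega), hcore, fold_eq_bGroups c [] false]
        simp
      have hheadc : bGroups d = d.head hd :: bGroups d.tail := by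
        conv_lhs => rw [← List.cons_head_tail hd]
        rw [bG_cons_nonsil _ hdh]
      have houtd : (if (bGroups seq).head? == some "sil"
          then PySem.List.slice (bGroups seq) (some 1) none else bGroups seq) = bGroups d := by
        by_cases hfirst : is_silence (seq.head hne) = true
        · have htl : seq.tail.dropWhile is_silence = d := by
            rw [hddef]
            conv_rhs => rw [← List.cons_head_tail hne]
            rw [List.dropWhile_cons_of_pos hfirst]
          have h2 : bGroups seq = "sil" :: bGroups d := by
            conv_lhs => rw [← List.cons_head_tail hne]
            rw [bG_cons_sil _ hfirst, htl]
          rw [h2]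
          simp [PySem.List.slice_from_one]
        · rw [Bool.not_eq_true] at hfirst
          have hdseq : d = seq := by
            rw [hddef]
            conv_lhs => rw [← List.cons_head_tail hne]
            rw [List.dropWhile_cons_of_neg (by simpa using hfirst)]
            exact List.cons_head_tail hne
          rw [← hdseq, hheadc]
          simp [nonsil_ne_sil hdh]
      have hBa : collapse_silences_alt seq = bGroups c := by
        simp only [collapse_silences_alt, houtd]
        by_cases hs : s = []
        · have hdc : d = c := by rw [← hcs, hs, List.append_nil]
          have hsnoc : bGroups c = bGroups c.dropLast ++ [c.getLast hcne] := by
            conv_lhs => rw [← List.dropLast_concat_getLast hcne]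
            rw [bG_snoc _ hlastc]
          rw [hdc, hsnoc, List.getLast?_concat]
          rw [if_neg (by simp [nonsil_ne_sil hlastc]), ← hsnoc]
        · have hsall : ∀ x ∈ s, is_silence x = true := fun x hx => List.mem_rtakeWhile_imp hx
          have hBs : bGroups d = bGroups c ++ ["sil"] := by
            rw [← hcs, bG_append s hcne hlastc, bG_all_sil hsall hs]
          rw [hBs, List.getLast?_concat]
          rw [if_pos (by simp), PySem.List.slice_to_neg_one, List.dropLast_concat]
      rw [hA, hBa]
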